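-- pv_equiv track=rewrite | github.com/Ani0202/DSA-Questions | Strings/String search/Prob2.py | solve
-- ===== SOURCE A (Python) =====
-- def gcd(a, b):
--     while b:
--         a, b = b, a%b
--     return a
--
-- def lcm(a, b):
--     return (a * b) // gcd(a, b)
--
-- def computeLPSArray(pat):
--     i=(pat+pat).find(pat,1,-1)
--     return len(pat) if i == -1 else i
--
-- def solve(A):
--     n = len(A)
--     ans = 1
--     for s in A:
--         res = computeLPSArray(s)
--         for i in range(1, 2*res+1):
--             if ((i*(i+1))//2)%res == 0:
--                 ans = lcm(ans, i)
--                 break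
--     return ans % 1000000007
-- ===== SOURCE B (Python) =====
-- def gcd(a, b):
--     return a if b == 0 else gcd(b, a % b)
--
--
-- def period(s):
--     # smallest rotation period: first divisor d of n with s[d:] == s[:n-d]; 0 for ''
--     n = len(s)
--     for d in range(1, n + 1):
--         if n % d == 0 and s[d:] == s[:n - d]:
--             return d
--     return 0
--
--
-- def pick(res):
--     # smallest i >= 1 with res | i*(i+1)/2 (exists: i = 2*res works)
--     i = 1
--     while ((i * (i + 1)) // 2) % res != 0:
--         i += 1
--     return i
--
--
-- def solve(A):
--     ans = 1
--     for s in A: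
--         if s:
--             i = pick(period(s))
--             ans = (ans * i) // gcd(ans, i)
--     return ans % 1000000007
-- ===== Notes on version B (the rewrite author's own statement) =====
-- stated objective: alternative
-- what changed: The period is computed by scanning the divisors d of len(s) with a suffix/prefix equality test s[d:] == s[:n-d] instead of searching the doubled string with (s+s).find(s,1,-1); the per-string lcm factor is found by an unbounded while-loop counting i upward until res | i*(i+1)/2 and lcm is applied once outside, instead of A's bounded range loop with break that folds lcm inside; gcd is recursive and the empty-string case is skipped explicitly.
import Mathlib
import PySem

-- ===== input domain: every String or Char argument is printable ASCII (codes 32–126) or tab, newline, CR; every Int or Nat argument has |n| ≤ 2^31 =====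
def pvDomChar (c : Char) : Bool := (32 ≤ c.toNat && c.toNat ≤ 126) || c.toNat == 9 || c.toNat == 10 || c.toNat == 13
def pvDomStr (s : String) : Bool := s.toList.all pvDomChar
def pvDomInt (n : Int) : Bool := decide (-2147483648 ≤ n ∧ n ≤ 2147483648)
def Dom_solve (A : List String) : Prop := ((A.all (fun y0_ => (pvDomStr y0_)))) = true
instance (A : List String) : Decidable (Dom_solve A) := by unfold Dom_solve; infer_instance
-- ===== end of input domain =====

-- B restructures the computation (objective: alternative, same cost class): the period is
-- found by scanning the divisors d of len(s) with a suffix/prefix test s[d:] == s[:n-d]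
-- instead of searching the doubled string; the per-string factor is the first i with
-- res | i*(i+1)/2 found by an unbounded count-up (while) instead of A's bounded
-- range-with-break folding lcm inside; lcm is applied once outside, empty strings skipped.

-- ===== PORT A =====
-- gcd's while-loop, run on |b|+1 fuel: |a % b| < |b| (Python sign rules), so the fuel
-- is never exhausted and the loop finishes exactly as Python's does.
def pvGcdGoA : Nat → Int → Int → Int
  | 0, a, _ => a
  | fuel + 1, a, b => if b = 0 then a else pvGcdGoA fuel b (PySem.Int.mod a b)

def pvGcdA (a b : Int) : Int := pvGcdGoA (b.natAbs + 1) a b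

def pvLcmA (a b : Int) : Int := PySem.Int.floordiv (a * b) (pvGcdA a b)

def computeLPSArrayA (pat : String) : Int :=
  let i := PySem.Str.findFrom (pat ++ pat) pat 1 (some (-1))
  if i = -1 then PySem.Str.len pat else i

-- A's inner for-loop with its break
def pvInnerA (res ans : Int) : List Int → Int
  | [] => ans
  | i :: t =>
      if PySem.Int.mod (PySem.Int.floordiv (i * (i + 1)) 2) res = 0 then pvLcmA ans i
      else pvInnerA res ans t

def solve (A : List String) : Int :=
  PySem.Int.mod
    (A.foldl (fun ans s =>
      let res := computeLPSArrayA s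
      pvInnerA res ans (PySem.List.pyRange 1 (2 * res + 1))) 1)
    1000000007

-- ===== PORT B =====
-- B's recursive gcd, on |b|+1 fuel (same termination argument: |a % b| < |b|)
def pvGcdGoB : Nat → Int → Int → Int
  | 0, a, _ => a
  | fuel + 1, a, b => if b = 0 then a else pvGcdGoB fuel b (PySem.Int.mod a b)

def pvGcdB (a b : Int) : Int := pvGcdGoB (b.natAbs + 1) a b

-- B's period scan: first d in 1..n with n % d == 0 and s[d:] == s[:n-d], else 0
def pvPeriodGo (cs : List Char) : List Int → Int
  | [] => 0
  | d :: t =>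
      if PySem.Int.mod (cs.length : Int) d = 0 ∧
          PySem.List.slice cs (some d) none =
            PySem.List.slice cs none (some ((cs.length : Int) - d)) then d
      else pvPeriodGo cs t

def pvPeriodB (s : String) : Int :=
  pvPeriodGo s.toList (PySem.List.pyRange 1 ((s.toList.length : Int) + 1))

-- B's while-loop counting i upward, on fuel 2*res: i = 2*res always satisfies the test,
-- so the fuel is never exhausted and the loop stops exactly where Python's while stops
def pvPickGo (res : Int) : Nat → Int → Int
  | 0, i => i
  | fuel + 1, i =>
      if PySem.Int.mod (PySem.Int.floordiv (i * (i + 1)) 2) res = 0 then i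
      else pvPickGo res fuel (i + 1)

def pvPick (res : Int) : Int := pvPickGo res (2 * res).toNat 1

-- B's main loop as structural recursion over the list of strings
def pvSolveGoB : List String → Int → Int
  | [], ans => ans
  | s :: t, ans =>
      pvSolveGoB t
        (if s.toList = [] then ans
         else
           let i := pvPick (pvPeriodB s)
           PySem.Int.floordiv (ans * i) (pvGcdB ans i))

def solve_alt (A : List String) : Int :=
  PySem.Int.mod (pvSolveGoB A 1) 1000000007

-- ===== PRECONDITION & SPEC =====
def Spec_solve (A : List String) (out : Int) : Prop := out = solve_alt A
instance (A : List String) (out : Int) : Decidable (Spec_solve A out) := by unfold Spec_solve; infer_instance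

-- ===== CLAIM (what is proved, stated in full; the proofs are below) =====
def Claim_equal_solve : Prop := ∀ (A : List String), Dom_solve A → Spec_solve A (solve A)

-- ===== LEMMAS AND PROOFS =====

theorem pvGcdGo_eq (fuel : Nat) (a b : Int) : pvGcdGoA fuel a b = pvGcdGoB fuel a b := by
  induction fuel generalizing a b with
  | zero => rfl
  | succ fuel ih => rw [pvGcdGoA, pvGcdGoB]; split <;> simp [ih]

theorem pvGcd_eq (a b : Int) : pvGcdA a b = pvGcdB a b := pvGcdGo_eq _ a b

-- the rotation-period predicate
def pvP (cs : List Char) (i : Nat) : Prop := 0 < i ∧ cs.rotate i = cs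

@[reducible] def pvPDec (cs : List Char) : DecidablePred (pvP cs) := fun i => by
  unfold pvP; infer_instance

theorem pvP_ex (cs : List Char) (h : cs ≠ []) : ∃ i, pvP cs i :=
  ⟨cs.length, by simp [pvP, List.length_pos_iff, h]⟩

-- the least rotation period of a nonempty word
def pvM (cs : List Char) (h : cs ≠ []) : Nat :=
  @Nat.find (pvP cs) (pvPDec cs) (pvP_ex cs h)

theorem pvM_spec (cs : List Char) (h : cs ≠ []) : pvP cs (pvM cs h) :=
  @Nat.find_spec (pvP cs) (pvPDec cs) (pvP_ex cs h)

theorem pvM_min (cs : List Char) (h : cs ≠ []) {k : Nat} (hk : k < pvM cs h) : ¬ pvP cs k :=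
  @Nat.find_min (pvP cs) (pvPDec cs) (pvP_ex cs h) k hk

theorem pvM_le (cs : List Char) (h : cs ≠ []) {k : Nat} (hk : pvP cs k) : pvM cs h ≤ k :=
  @Nat.find_le k (pvP cs) (pvPDec cs) (pvP_ex cs h) hk

theorem pv_rot_mul (cs : List Char) (i : Nat) (h : cs.rotate i = cs) (k : Nat) :
    cs.rotate (i * k) = cs := by
  induction k with
  | zero => simp
  | succ k ih =>
      have h2 : cs.rotate (i * k + i) = cs := by
        rw [← List.rotate_rotate, ih, h]
      simpa [Nat.mul_succ] using h2

-- the least rotation period divides the length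
theorem pv_min_dvd (cs : List Char) (h : cs ≠ []) :
    pvM cs h ∣ cs.length := by
  set m := pvM cs h with hmdef
  obtain ⟨hm0, hmrot⟩ := pvM_spec cs h
  have h1 : cs.rotate cs.length = cs := List.rotate_length cs
  have h2 : cs.length = m * (cs.length / m) + cs.length % m :=
    (Nat.div_add_mod cs.length m).symm
  rw [h2, ← List.rotate_rotate, pv_rot_mul cs m hmrot] at h1
  by_contra hdvd
  have hpos : 0 < cs.length % m :=
    Nat.pos_of_ne_zero (fun h0 => hdvd (Nat.dvd_of_mod_eq_zero h0))
  have hlt : cs.length % m < m := Nat.mod_lt _ hm0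
  exact pvM_min cs h hlt ⟨hpos, h1⟩

-- rotation period d ⇒ the d-shifted suffix equals the (n-d)-prefix
theorem pv_droptake_of_rot (cs : List Char) (d : Nat) (hdn : d ≤ cs.length)
    (h : cs.rotate d = cs) : cs.drop d = cs.take (cs.length - d) := by
  rw [List.rotate_eq_drop_append_take hdn] at h
  have := congrArg (List.take (cs.length - d)) h
  rwa [List.take_append_of_le_length (by simp), List.take_of_length_le (by simp)] at this

-- elementwise periodicity from the suffix/prefix equality
theorem pv_step (cs : List Char) (d : Nat)
    (hp : cs.drop d = cs.take (cs.length - d)) :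
    ∀ j, j + d < cs.length → cs[j + d]? = cs[j]? := by
  intro j hj
  rw [show j + d = d + j from Nat.add_comm j d, ← List.getElem?_drop, hp,
    List.getElem?_take_of_lt (by omega)]

theorem pv_chain (cs : List Char) (d : Nat)
    (hp : cs.drop d = cs.take (cs.length - d)) :
    ∀ k j, j + k * d < cs.length → cs[j + k * d]? = cs[j]? := by
  intro k
  induction k with
  | zero => intro j hj; simp
  | succ k ih =>
      intro j hj
      have e : j + (k + 1) * d = (j + k * d) + d := by ring
      rw [e, pv_step cs d hp (j + k * d) (by omega), ih j (by omega)]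

-- suffix/prefix equality + divisibility ⇒ rotation period
theorem pv_rot_of_droptake (cs : List Char) (d : Nat)
    (hdvd : d ∣ cs.length) (hp : cs.drop d = cs.take (cs.length - d)) :
    cs.rotate d = cs := by
  by_cases hnil : cs = []
  · simp [hnil]
  have hn0 : 0 < cs.length := List.length_pos_iff.2 hnil
  obtain ⟨c, hc⟩ := hdvd
  have hc1 : 0 < c := by
    rcases Nat.eq_zero_or_pos c with rfl | h
    · rw [Nat.mul_zero] at hc; omega
    · exact h
  obtain ⟨c', rfl⟩ : ∃ c', c = c' + 1 := ⟨c - 1, by omega⟩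
  have hnd : cs.length = c' * d + d := by
    rw [hc]
    calc d * (c' + 1) = d * c' + d := Nat.mul_succ d c'
      _ = c' * d + d := by rw [Nat.mul_comm]
  apply List.ext_getElem?
  intro i
  by_cases hi : i < cs.length
  · rw [List.getElem?_rotate hi]
    by_cases hcase : i + d < cs.length
    · rw [Nat.mod_eq_of_lt hcase]
      exact pv_step cs d hp i hcase
    · have hge : cs.length ≤ i + d := Nat.le_of_not_lt hcase
      have hmod : (i + d) % cs.length = i + d - cs.length := by
        rw [Nat.mod_eq_sub_mod hge, Nat.mod_eq_of_lt (by omega)]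
      have hj : i + d - cs.length + c' * d = i := by omega
      have hch := pv_chain cs d hp c' (i + d - cs.length) (by omega)
      rw [hj] at hch
      rw [hmod]
      exact hch.symm
  · rw [List.getElem?_eq_none (by simpa using Nat.le_of_not_lt hi),
      List.getElem?_eq_none (by exact Nat.le_of_not_lt hi)]

-- B's loop condition at 1 ≤ d ≤ n decodes to divisibility + the suffix/prefix test
theorem pvB_cond (cs : List Char) (d : Nat) (hdn : d ≤ cs.length) :
    ((PySem.Int.mod (cs.length : Int) (d : Int) = 0 ∧
      PySem.List.slice cs (some (d : Int)) none =
        PySem.List.slice cs none (some ((cs.length : Int) - (d : Int)))) ↔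
    (cs.length % d = 0 ∧ cs.drop d = cs.take (cs.length - d))) := by
  have hmod : PySem.Int.mod (cs.length : Int) (d : Int) = ((cs.length % d : Nat) : Int) :=
    PySem.Int.mod_natCast cs.length d
  have hfrom : PySem.List.slice cs (some (d : Int)) none = cs.drop d :=
    PySem.List.slice_from_natCast cs d
  have hcast : (cs.length : Int) - (d : Int) = ((cs.length - d : Nat) : Int) := by
    push_cast; omega
  have hto : PySem.List.slice cs none (some ((cs.length : Int) - (d : Int))) =
      cs.take (cs.length - d) := by
    rw [hcast]; exact PySem.List.slice_to_natCast cs (cs.length - d)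
  rw [hmod, hfrom, hto]
  constructor
  · rintro ⟨h1, h2⟩; exact ⟨by exact_mod_cast h1, h2⟩
  · rintro ⟨h1, h2⟩; exact ⟨by exact_mod_cast h1, h2⟩

-- first-match characterisation of B's divisor scan
theorem pvB_loop (cs : List Char) (h : cs ≠ []) :
    ∀ (k a : Nat), pvM cs h - a = k → 0 < a → a ≤ pvM cs h →
      pvPeriodGo cs (PySem.List.pyRange (a : Int) ((cs.length : Int) + 1)) =
        ((pvM cs h : Nat) : Int) := by
  have hmn : pvM cs h ≤ cs.length :=
    pvM_le cs h ⟨List.length_pos_iff.2 h, List.rotate_length cs⟩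
  obtain ⟨hm0, hmrot⟩ := pvM_spec cs h
  intro k
  induction k with
  | zero =>
      intro a hk ha ham
      have heq : a = pvM cs h := by omega
      subst heq
      rw [PySem.List.pyRange_one_cons (by push_cast; omega), pvPeriodGo,
        if_pos ((pvB_cond cs (pvM cs h) hmn).2
          ⟨Nat.mod_eq_zero_of_dvd (pv_min_dvd cs h),
           pv_droptake_of_rot cs (pvM cs h) hmn hmrot⟩)]
  | succ k ih =>
      intro a hk ha ham
      have ham' : a < pvM cs h := by omega
      rw [PySem.List.pyRange_one_cons (by push_cast; omega), pvPeriodGo, if_neg]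
      · have hcast : ((a : Int) + 1) = ((a + 1 : Nat) : Int) := by push_cast; ring
        rw [hcast]
        exact ih (a + 1) (by omega) (by omega) (by omega)
      · intro hc
        have hc' := (pvB_cond cs a (by omega)).1 hc
        exact pvM_min cs h ham'
          ⟨ha, pv_rot_of_droptake cs a (Nat.dvd_of_mod_eq_zero hc'.1) hc'.2⟩

theorem pvB_char (pat : String) (h : pat.toList ≠ []) :
    pvPeriodB pat = ((pvM pat.toList h : Nat) : Int) := by
  have hm0 : 0 < pvM pat.toList h := (pvM_spec pat.toList h).1
  unfold pvPeriodB
  have := pvB_loop pat.toList h (pvM pat.toList h - 1) 1 rfl (by omega) (by omega)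
  simpa using this

-- ===== A-side characterisation (as in the doubled-string find semantics) =====

-- the haystack A's find searches: (s+s) restricted to [1, 2n-1)
theorem pv_t_eq (cs : List Char) (h : cs ≠ []) :
    List.drop 1 (List.take (2 * cs.length - 1) (cs ++ cs)) =
      List.drop 1 cs ++ cs.dropLast := by
  have hn : 1 ≤ cs.length := List.length_pos_iff.2 h
  have h1 : List.take (2 * cs.length - 1) (cs ++ cs) = cs ++ cs.dropLast := by
    rw [List.take_append, List.take_of_length_le (by omega),
      show 2 * cs.length - 1 - cs.length = cs.length - 1 by omega, List.dropLast_eq_take]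
  rw [h1, List.drop_append, Nat.sub_eq_zero_of_le hn, List.drop_zero]

theorem pv_occ_iff (cs : List Char) (j : Nat) (hj : j + 1 ≤ cs.length - 1) (h : cs ≠ []) :
    (cs <+: List.drop j (List.drop 1 cs ++ cs.dropLast)) ↔ cs.rotate (j+1) = cs := by
  have hn : 1 ≤ cs.length := List.length_pos_iff.2 h
  have hlen1 : (List.drop 1 cs).length = cs.length - 1 := by simp
  have hld : cs.dropLast.length = cs.length - 1 := by simp
  have hdj : List.drop j (List.drop 1 cs ++ cs.dropLast) =
      List.drop (j+1) cs ++ cs.dropLast := by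
    rw [List.drop_append, Nat.sub_eq_zero_of_le (by omega), List.drop_zero,
      List.drop_drop, Nat.add_comm 1 j]
  rw [hdj, List.prefix_iff_eq_take, List.take_append,
    List.take_of_length_le (by simp)]
  have htk : List.take (cs.length - (List.drop (j+1) cs).length) cs.dropLast =
      List.take (j+1) cs := by
    rw [List.dropLast_eq_take, List.take_take, List.length_drop]
    congr 1
    omega
  rw [htk, List.rotate_eq_drop_append_take (by omega)]
  constructor
  · intro h2; exact h2.symm
  · intro h2; exact h2.symm

theorem pv_occ_big (cs : List Char) (j : Nat) (hj : cs.length - 1 ≤ j) (h : cs ≠ []) :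
    ¬ cs <+: List.drop j (List.drop 1 cs ++ cs.dropLast) := by
  intro hpre
  have hlen := hpre.length_le
  have hn : 1 ≤ cs.length := List.length_pos_iff.2 h
  simp [List.dropLast_eq_take, List.length_take] at hlen
  omega

-- evaluate A's bounded find call on a nonempty string
theorem pv_findFrom_eval (cs : List Char) (h : cs ≠ []) :
    PySem.Chars.findFrom (cs ++ cs) cs 1 (some (-1)) =
      (if PySem.Chars.find (List.drop 1 cs ++ cs.dropLast) cs = -1 then -1
       else 1 + PySem.Chars.find (List.drop 1 cs ++ cs.dropLast) cs) := by
  have hn : 1 ≤ cs.length := List.length_pos_iff.2 h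
  rw [show (List.drop 1 cs ++ cs.dropLast) = List.drop 1 (List.take (2 * cs.length - 1) (cs ++ cs)) from (pv_t_eq cs h).symm]
  simp only [PySem.Chars.findFrom, List.length_append]
  have e1 : ¬ ((cs.length + cs.length : Nat) : Int) < -1 := by push_cast; omega
  have e2 : (-1 : Int) < 0 := by omega
  have e3 : ¬ (-1 + ((cs.length + cs.length : Nat) : Int) < 0) := by push_cast; omega
  have e4 : ¬ ((1 : Int) < 0) := by omega
  have e5 : ¬ (-1 + ((cs.length + cs.length : Nat) : Int) < 1) := by push_cast; omega
  rw [if_neg e1, if_pos e2, if_neg e3, if_neg e4, if_neg e5]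
  have e6 : (-1 + ((cs.length + cs.length : Nat) : Int)).toNat = 2 * cs.length - 1 := by
    omega
  have e7 : (1 : Int).toNat = 1 := by omega
  rw [e6, e7]

-- A's computeLPSArray equals the least rotation period (nonempty string)
theorem pvA_char (pat : String) (h : pat.toList ≠ []) :
    computeLPSArrayA pat = ((pvM pat.toList h : Nat) : Int) := by
  set cs := pat.toList with hcs
  set m := pvM cs h with hmdef
  obtain ⟨hm0, hmrot⟩ := pvM_spec cs h
  have hn : 1 ≤ cs.length := List.length_pos_iff.2 h
  have hmn : m ≤ cs.length :=
    pvM_le cs h ⟨by omega, List.rotate_length cs⟩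
  have hff : PySem.Str.findFrom (pat ++ pat) pat 1 (some (-1)) =
      (if PySem.Chars.find (List.drop 1 cs ++ cs.dropLast) cs = -1 then -1
       else 1 + PySem.Chars.find (List.drop 1 cs ++ cs.dropLast) cs) := by
    rw [PySem.Str.findFrom_eq, String.toList_append, ← hcs]
    exact pv_findFrom_eval cs h
  set t := List.drop 1 cs ++ cs.dropLast with htdef
  by_cases hcase : m < cs.length
  · -- find returns m - 1
    have hocc : cs <+: List.drop (m-1) t := by
      rw [htdef, pv_occ_iff cs (m-1) (by omega) h, show m - 1 + 1 = m by omega]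
      exact hmrot
    have hinfix : cs <:+: t :=
      (PySem.Chars.isIn_iff_infix cs t).1
        ((PySem.Chars.exists_prefix_drop_iff_isIn cs t).1 ⟨m-1, hocc⟩)
    have hpos : 0 ≤ PySem.Chars.find t cs := (PySem.Chars.find_nonneg_iff t cs).2 hinfix
    obtain ⟨hfpre, hfmin⟩ := PySem.Chars.find_spec hpos
    have hval : (PySem.Chars.find t cs).toNat = m - 1 := by
      rcases Nat.lt_trichotomy (PySem.Chars.find t cs).toNat (m-1) with hlt | heq | hgt
      · -- a smaller occurrence would be a smaller rotation period
        exfalso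
        have hrot2 : cs.rotate ((PySem.Chars.find t cs).toNat + 1) = cs := by
          rw [← pv_occ_iff cs _ (by omega) h, ← htdef]
          exact hfpre
        exact pvM_min cs h (by omega) ⟨by omega, hrot2⟩
      · exact heq
      · exact absurd hocc (hfmin (m-1) hgt)
    have hfind : PySem.Chars.find t cs = ((m - 1 : Nat) : Int) := by
      rw [← hval, Int.toNat_of_nonneg hpos]
    have hne1 : ¬ (((m - 1 : Nat) : Int) = -1) := by omega
    have hne2 : ¬ ((1 : Int) + ((m - 1 : Nat) : Int) = -1) := by omega
    unfold computeLPSArrayA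
    rw [hff, hfind, if_neg hne1, if_neg hne2]
    omega
  · -- m = length: no occurrence, find = -1, return len
    have hmeq : m = cs.length := by omega
    have hnocc : ∀ j, ¬ cs <+: List.drop j t := by
      intro j hpre
      by_cases hjs : j + 1 ≤ cs.length - 1
      · have hrot2 : cs.rotate (j+1) = cs := by
          rw [← pv_occ_iff cs j hjs h, ← htdef]; exact hpre
        exact pvM_min cs h (by omega) ⟨by omega, hrot2⟩
      · exact pv_occ_big cs j (by omega) h (htdef ▸ hpre)
    have hninf : ¬ cs <:+: t := by
      intro hinf
      obtain ⟨j, hj⟩ := (PySem.Chars.exists_prefix_drop_iff_isIn cs t).2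
        ((PySem.Chars.isIn_iff_infix cs t).2 hinf)
      exact hnocc j hj
    have hfind : PySem.Chars.find t cs = -1 :=
      (PySem.Chars.find_eq_neg_one_iff t cs).2 hninf
    unfold computeLPSArrayA
    rw [hff, hfind, if_pos rfl, if_pos rfl]
    rw [hmeq]
    simp [PySem.Str.len, hcs]

-- ===== the inner scan and B's while loop find the same i =====

-- the triangular test holds at i = 2*m
theorem pv_hit_top (m : Nat) (hm : 0 < m) :
    PySem.Int.mod (PySem.Int.floordiv ((2 * (m : Nat) : Nat) * ((2 * (m : Nat) : Nat) + 1)) 2) (m : Int) = 0 := by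
  have hdiv : PySem.Int.floordiv (((2 * m : Nat) : Int) * (((2 * m : Nat) : Int) + 1)) 2 =
      (m : Int) * ((2 * (m : Int)) + 1) := by
    rw [PySem.Int.floordiv_eq_ediv_of_pos (by omega)]
    have : ((2 * m : Nat) : Int) * (((2 * m : Nat) : Int) + 1) =
        2 * ((m : Int) * ((2 * (m : Int)) + 1)) := by push_cast; ring
    rw [this, Int.mul_ediv_cancel_left _ (by omega)]
  rw [show (((2 * m : Nat) : Int) * (((2 * m : Nat) : Int) + 1)) = (((2 * m : Nat) : Int) * (((2 * m : Nat) : Int) + 1)) from rfl] at hdiv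
  push_cast at hdiv ⊢
  rw [hdiv, PySem.Int.mod_eq_emod_of_pos (by exact_mod_cast hm), Int.mul_emod_right]

-- A's bounded scan-with-break equals lcm of ans with B's count-up result
theorem pv_inner_pick (mn : Nat) (hm : 1 ≤ mn) (ans : Int) :
    ∀ (k a : Nat), 1 ≤ a → a ≤ 2 * mn → 2 * mn - a = k →
      pvInnerA (mn : Int) ans (PySem.List.pyRange (a : Int) (2 * (mn : Int) + 1)) =
        pvLcmA ans (pvPickGo (mn : Int) (2 * mn - a + 1) (a : Int)) := by
  intro k
  induction k with
  | zero =>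
      intro a ha ham hk
      have heq : a = 2 * mn := by omega
      subst heq
      have hhit := pv_hit_top mn (by omega)
      push_cast at hhit
      rw [PySem.List.pyRange_one_cons (by push_cast; omega), pvInnerA]
      rw [show 2 * mn - 2 * mn + 1 = 1 from by omega, pvPickGo]
      rw [if_pos (by push_cast; exact hhit), if_pos (by push_cast; exact hhit)]
  | succ k ih =>
      intro a ha ham hk
      have ham' : a < 2 * mn := by omega
      rw [PySem.List.pyRange_one_cons (by push_cast; omega), pvInnerA]
      rw [show 2 * mn - a + 1 = (2 * mn - (a + 1) + 1) + 1 from by omega, pvPickGo]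
      by_cases hcond : PySem.Int.mod (PySem.Int.floordiv ((a : Int) * ((a : Int) + 1)) 2) (mn : Int) = 0
      · rw [if_pos hcond, if_pos hcond]
      · rw [if_neg hcond, if_neg hcond]
        have hcast : ((a : Int) + 1) = ((a + 1 : Nat) : Int) := by push_cast; ring
        rw [hcast]
        exact ih (a + 1) (by omega) (by omega) (by omega)

-- A's empty-string period is 0
theorem pvA_nil (pat : String) (h : pat.toList = []) : computeLPSArrayA pat = 0 := by
  unfold computeLPSArrayA
  rw [PySem.Str.findFrom_eq, String.toList_append, h]
  rw [show PySem.Chars.findFrom (([] : List Char) ++ []) [] 1 (some (-1)) = -1 from by decide]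
  rw [if_pos rfl]
  simp [PySem.Str.len, h]

-- one string's contribution: A's let-body equals B's loop body
theorem pv_step_eq (s : String) (ans : Int) :
    (let res := computeLPSArrayA s
     pvInnerA res ans (PySem.List.pyRange 1 (2 * res + 1))) =
    (if s.toList = [] then ans
     else
       let i := pvPick (pvPeriodB s)
       PySem.Int.floordiv (ans * i) (pvGcdB ans i)) := by
  by_cases h : s.toList = []
  · rw [if_pos h]
    simp only [pvA_nil s h]
    rw [show (2 * (0:Int) + 1) = 1 from by ring, PySem.List.pyRange_one_eq_nil (by omega)]
    rfl
  · rw [if_neg h]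
    set m := pvM s.toList h with hmdef
    have hm0 : 0 < m := (pvM_spec s.toList h).1
    simp only [pvA_char s h, pvB_char s h]
    have hfuel : ((2 * ((m : Nat) : Int)).toNat) = 2 * m := by omega
    have hmain := pv_inner_pick m hm0 ans (2 * m - 1) 1 (by omega) (by omega) (by omega)
    rw [show ((1 : Nat) : Int) = (1 : Int) from rfl] at hmain
    rw [show (2 * ((m : Nat) : Int) + 1) = (2 * (m : Int) + 1) from by push_cast; ring]
    rw [hmain, show 2 * m - 1 + 1 = 2 * m from by omega]
    unfold pvPick pvLcmA
    rw [hfuel, pvGcd_eq]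

theorem pv_fold_eq (A : List String) (ans : Int) :
    A.foldl (fun ans s =>
      let res := computeLPSArrayA s
      pvInnerA res ans (PySem.List.pyRange 1 (2 * res + 1))) ans = pvSolveGoB A ans := by
  induction A generalizing ans with
  | nil => rfl
  | cons s t ih =>
      rw [List.foldl_cons, pvSolveGoB, pv_step_eq s ans, ih]

-- ===== VERDICT (by name: the statement is the Claim_ definition above) =====
theorem solve_spec : Claim_equal_solve := by
  intro A _
  unfold Spec_solve solve solve_alt
  rw [pv_fold_eq]
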